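-- pv_equiv track=rewrite | github.com/DevBhut/Data-Structures-and-Algorithm | Leetcode Questions/1886-Obtain-Matrix-By-Rotation/1886.py | checkRotateOpti
-- ===== SOURCE A (Python) =====
-- def checkRotateOpti(mat: list[list[int]], target: list[list[int]]) -> bool:
--     check = [True]*4
--     n = len(mat)
--     for i in range(n):
--         for j in range(n):
--             if mat[i][j] != target[i][j]:   check[0] = False            #  0 degree rotation check
--             if mat[i][j] != target[n-j-1][i]:   check[1] = False        # 90 degree rotation check
--             if mat[i][j] != target[n-i-1][n-j-1]:   check[2] = False    #180 degree rotation check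
--             if mat[i][j] != target[j][n-i-1]:   check[3] = False        #270 degree rotation check
--     return True if True in check else False
-- ===== SOURCE B (Python) =====
-- def checkRotateOpti(mat: list[list[int]], target: list[list[int]]) -> bool:
--     n = len(mat)
--     cur = [row[:n] for row in mat]
--     tgt = [row[:n] for row in target[:n]]
--     for _ in range(4):
--         if cur == tgt:
--             return True
--         cur = [[cur[n - 1 - j][i] for j in range(n)] for i in range(n)]
--     return False
-- ===== Notes on version B (the rewrite author's own statement) =====
-- stated objective: alternative
-- what changed: Replaces A's single fused pass that tests four rotation index formulas simultaneously in one nested loop with a rotate-then-compare loop: take the n x n grids A reads (a crop that is the identity on the square inputs the problem guarantees), then up to four times compare the current grid wholesale with the target and rotate it 90 degrees.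
import Mathlib
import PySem

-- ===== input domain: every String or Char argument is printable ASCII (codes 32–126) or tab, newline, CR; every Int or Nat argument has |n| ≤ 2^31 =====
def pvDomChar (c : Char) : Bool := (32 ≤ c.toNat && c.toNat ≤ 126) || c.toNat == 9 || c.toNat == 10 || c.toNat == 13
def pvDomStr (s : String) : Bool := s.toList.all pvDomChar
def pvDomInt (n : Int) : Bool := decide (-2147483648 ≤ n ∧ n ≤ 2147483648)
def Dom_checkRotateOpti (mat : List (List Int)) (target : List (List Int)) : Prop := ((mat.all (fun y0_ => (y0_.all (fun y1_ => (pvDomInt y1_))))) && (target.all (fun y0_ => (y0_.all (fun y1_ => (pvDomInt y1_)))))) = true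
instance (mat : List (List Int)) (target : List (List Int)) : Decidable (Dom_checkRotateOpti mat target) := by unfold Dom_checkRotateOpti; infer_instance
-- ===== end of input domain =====

-- B replaces A's fused four-formula pass with a rotate-then-compare loop (same O(n^2) cost, simpler).


-- ===== PORT A =====
-- mat[i][j]-style double index; in-range under Pre_, where it is exact (Python raises out of range)
def pvIdx2 (M : List (List Int)) (i j : Int) : Int :=
  PySem.List.pyGetD (PySem.List.pyGetD M i []) j 0

def checkRotateOpti (mat : List (List Int)) (target : List (List Int)) : Bool :=
  let n : Int := mat.length
  let check :=
    (PySem.List.pyRange 0 n).foldl (fun ch i =>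
      (PySem.List.pyRange 0 n).foldl (fun ch j =>
        (ch.1 && (pvIdx2 mat i j == pvIdx2 target i j),
         ch.2.1 && (pvIdx2 mat i j == pvIdx2 target (n - j - 1) i),
         ch.2.2.1 && (pvIdx2 mat i j == pvIdx2 target (n - i - 1) (n - j - 1)),
         ch.2.2.2 && (pvIdx2 mat i j == pvIdx2 target j (n - i - 1)))) ch)
      (true, true, true, true)
  check.1 || check.2.1 || check.2.2.1 || check.2.2.2

-- ===== PORT B =====
-- one clockwise 90° rotation: [[cur[n-1-j][i] for j in range(n)] for i in range(n)]
def pvRot (cur : List (List Int)) : List (List Int) :=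
  (PySem.List.pyRange 0 (cur.length : Int)).map (fun i =>
    (PySem.List.pyRange 0 (cur.length : Int)).map (fun j =>
      pvIdx2 cur ((cur.length : Int) - 1 - j) i))

-- the 'for _ in range(4)' loop: compare, else rotate and recurse
def pvLoop (target : List (List Int)) : Nat → List (List Int) → Bool
  | 0, _ => false
  | k + 1, cur => if cur = target then true else pvLoop target k (pvRot cur)

def checkRotateOpti_alt (mat : List (List Int)) (target : List (List Int)) : Bool :=
  pvLoop
    ((PySem.List.slice target none (some (mat.length : Int))).map
      (fun r => PySem.List.slice r none (some (mat.length : Int))))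
    4
    (mat.map (fun r => PySem.List.slice r none (some (mat.length : Int))))

-- ===== PRECONDITION & SPEC =====
-- Exactly the inputs on which A returns (no IndexError): with n = len(mat), every row of mat and every
-- one of the first n rows of target has length ≥ n, and target has at least n rows.
def Pre_checkRotateOpti (mat : List (List Int)) (target : List (List Int)) : Prop :=
  (∀ r ∈ mat, mat.length ≤ r.length) ∧ mat.length ≤ target.length ∧
  (∀ r ∈ target.take mat.length, mat.length ≤ r.length)
instance (mat : List (List Int)) (target : List (List Int)) : Decidable (Pre_checkRotateOpti mat target) := by unfold Pre_checkRotateOpti; infer_instance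

def pvWitness_checkRotateOpti : List (List Int) × List (List Int) :=
  ([[1, 2], [3, 4]], [[3, 1], [4, 2]])

def Spec_checkRotateOpti (mat : List (List Int)) (target : List (List Int)) (out : Bool) : Prop := out = checkRotateOpti_alt mat target
instance (mat : List (List Int)) (target : List (List Int)) (out : Bool) : Decidable (Spec_checkRotateOpti mat target out) := by unfold Spec_checkRotateOpti; infer_instance

-- ===== CLAIM (what is proved, stated in full; the proofs are below) =====
def Claim_equal_checkRotateOpti : Prop := ∀ (mat : List (List Int)) (target : List (List Int)), Dom_checkRotateOpti mat target → Pre_checkRotateOpti mat target → Spec_checkRotateOpti mat target (checkRotateOpti mat target)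

-- ===== LEMMAS AND PROOFS =====

-- entry of a matrix at natural indices (total form used by the proofs)
def pvE (M : List (List Int)) (i j : Nat) : Int := (M.getD i []).getD j 0

theorem pvIdx2_natCast (M : List (List Int)) (i j : Nat) :
    pvIdx2 M (i : Int) (j : Int) = pvE M i j := by
  simp [pvIdx2, pvE, PySem.List.pyGetD_natCast]

-- the four-flag fold is a componentwise 'all'
theorem pv_fold4 (l : List Int) (f g h k : Int → Bool) (ch : Bool × Bool × Bool × Bool) :
    l.foldl (fun ch j =>
      (ch.1 && f j, ch.2.1 && g j, ch.2.2.1 && h j, ch.2.2.2 && k j)) ch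
    = (ch.1 && l.all f, ch.2.1 && l.all g, ch.2.2.1 && l.all h, ch.2.2.2 && l.all k) := by
  induction l generalizing ch with
  | nil => simp
  | cons x xs ih => simp [List.foldl_cons, ih, Bool.and_assoc]

theorem pvA_char (mat target : List (List Int)) :
    checkRotateOpti mat target =
      (let n : Int := mat.length
       let R := PySem.List.pyRange 0 n
       (R.all fun i => R.all fun j => pvIdx2 mat i j == pvIdx2 target i j) ||
       ((R.all fun i => R.all fun j => pvIdx2 mat i j == pvIdx2 target (n - j - 1) i) ||
       ((R.all fun i => R.all fun j => pvIdx2 mat i j == pvIdx2 target (n - i - 1) (n - j - 1)) ||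
        (R.all fun i => R.all fun j => pvIdx2 mat i j == pvIdx2 target j (n - i - 1))))) := by
  unfold checkRotateOpti
  simp only []
  rw [show (fun (ch : Bool × Bool × Bool × Bool) (i : Int) =>
      (PySem.List.pyRange 0 (mat.length : Int)).foldl (fun ch j =>
        (ch.1 && (pvIdx2 mat i j == pvIdx2 target i j),
         ch.2.1 && (pvIdx2 mat i j == pvIdx2 target ((mat.length : Int) - j - 1) i),
         ch.2.2.1 && (pvIdx2 mat i j == pvIdx2 target ((mat.length : Int) - i - 1) ((mat.length : Int) - j - 1)),
         ch.2.2.2 && (pvIdx2 mat i j == pvIdx2 target j ((mat.length : Int) - i - 1)))) ch)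
    = (fun ch i =>
        (ch.1 && (PySem.List.pyRange 0 (mat.length : Int)).all (fun j => pvIdx2 mat i j == pvIdx2 target i j),
         ch.2.1 && (PySem.List.pyRange 0 (mat.length : Int)).all (fun j => pvIdx2 mat i j == pvIdx2 target ((mat.length : Int) - j - 1) i),
         ch.2.2.1 && (PySem.List.pyRange 0 (mat.length : Int)).all (fun j => pvIdx2 mat i j == pvIdx2 target ((mat.length : Int) - i - 1) ((mat.length : Int) - j - 1)),
         ch.2.2.2 && (PySem.List.pyRange 0 (mat.length : Int)).all (fun j => pvIdx2 mat i j == pvIdx2 target j ((mat.length : Int) - i - 1))))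
    from funext fun ch => funext fun i => pv_fold4 _ _ _ _ _ _, pv_fold4]
  simp [Bool.or_assoc]

-- Bool 'all over range' ↔ quantified entries, with the Int index arithmetic pushed to Nat
theorem pv_allall (n : Nat) (p : Int → Int → Bool) (q : Nat → Nat → Prop)
    [∀ i j, Decidable (q i j)]
    (hpq : ∀ i j, i < n → j < n → (p (i : Int) (j : Int) = true ↔ q i j)) :
    (((PySem.List.pyRange 0 (n : Int)).all fun i =>
       (PySem.List.pyRange 0 (n : Int)).all fun j => p i j) = true)
      ↔ (∀ i < n, ∀ j < n, q i j) := by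
  rw [PySem.List.pyRange_zero_natCast]
  simp only [List.all_map, List.all_eq_true, List.mem_range, Function.comp]
  constructor
  · intro H i hi j hj; exact (hpq i j hi hj).mp (H i hi j hj)
  · intro H i hi j hj; exact (hpq i j hi hj).mpr (H i hi j hj)

-- squareness
def pvSq (n : Nat) (M : List (List Int)) : Prop :=
  M.length = n ∧ ∀ r ∈ M, r.length = n

theorem pvRot_sq (M : List (List Int)) (n : Nat) (h : M.length = n) :
    pvSq n (pvRot M) := by
  subst h
  constructor
  · simp [pvRot, PySem.List.length_pyRange_one]
  · intro r hr
    simp only [pvRot, List.mem_map] at hr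
    obtain ⟨i, _, rfl⟩ := hr
    simp [PySem.List.length_pyRange_one]

theorem pvRot_entry (M : List (List Int)) (n i j : Nat)
    (h : M.length = n) (hi : i < n) (hj : j < n) :
    pvE (pvRot M) i j = pvE M (n - 1 - j) i := by
  subst h
  have hc : ((M.length : Int) - 1 - (j : Int)) = ((M.length - 1 - j : Nat) : Int) := by omega
  unfold pvE pvRot
  rw [PySem.List.pyRange_zero_natCast]
  simp only [List.map_map, Function.comp_def]
  rw [PySem.List.getD_map_range _ _ _ _ hi]
  rw [PySem.List.getD_map_range _ _ _ _ hj]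
  rw [hc, pvIdx2_natCast]
  rfl

-- equality of same-shape matrices from equality of entries
theorem pv_eq_iff (n : Nat) (M T : List (List Int)) (hM : pvSq n M) (hT : pvSq n T) :
    M = T ↔ ∀ i < n, ∀ j < n, pvE M i j = pvE T i j := by
  constructor
  · rintro rfl; intro _ _ _ _; rfl
  · intro H
    apply List.ext_getElem (hM.1.trans hT.1.symm)
    intro i hiM hiT
    have hi : i < n := hM.1 ▸ hiM
    have hrM : M[i].length = n := hM.2 _ (List.getElem_mem hiM)
    have hrT : T[i].length = n := hT.2 _ (List.getElem_mem hiT)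
    apply List.ext_getElem (hrM.trans hrT.symm)
    intro j hjM hjT
    have hj : j < n := hrM ▸ hjM
    have := H i hi j hj
    unfold pvE at this
    rwa [List.getD_eq_getElem M [] hiM, List.getD_eq_getElem T [] hiT,
         List.getD_eq_getElem _ 0 hjM, List.getD_eq_getElem _ 0 hjT] at this

theorem pvLoop4 (t c : List (List Int)) :
    pvLoop t 4 c =
      (if c = t then true else if pvRot c = t then true
       else if pvRot (pvRot c) = t then true
       else if pvRot (pvRot (pvRot c)) = t then true else false) := rfl

theorem pvLoop_char (t c : List (List Int)) :
    (pvLoop t 4 c = true) ↔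
      (c = t ∨ pvRot c = t ∨ pvRot (pvRot c) = t ∨ pvRot (pvRot (pvRot c)) = t) := by
  rw [pvLoop4]
  by_cases h0 : c = t <;> by_cases h1 : pvRot c = t <;>
    by_cases h2 : pvRot (pvRot c) = t <;>
    by_cases h3 : pvRot (pvRot (pvRot c)) = t <;>
    simp [h0, h1, h2, h3]

-- shapes and entries of the cropped grids
theorem pvCropM_sq (mat : List (List Int))
    (h : ∀ r ∈ mat, mat.length ≤ r.length) :
    pvSq mat.length
      (mat.map (fun r => PySem.List.slice r none (some (mat.length : Int)))) := by
  constructor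
  · simp
  · intro r hr
    simp only [List.mem_map] at hr
    obtain ⟨s, hs, rfl⟩ := hr
    rw [PySem.List.slice_to_natCast]
    have := h s hs
    simp [List.length_take]
    omega

theorem pvCropT_sq (target : List (List Int)) (n : Nat) (hl : n ≤ target.length)
    (hr : ∀ r ∈ target.take n, n ≤ r.length) :
    pvSq n ((PySem.List.slice target none (some (n : Int))).map
      (fun r => PySem.List.slice r none (some (n : Int)))) := by
  rw [PySem.List.slice_to_natCast]
  constructor
  · simp [List.length_take]; omega
  · intro r hrm
    simp only [List.mem_map] at hrm
    obtain ⟨s, hs, rfl⟩ := hrm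
    rw [PySem.List.slice_to_natCast]
    have := hr s hs
    simp [List.length_take]
    omega

theorem pvCropM_entry (mat : List (List Int)) (i j : Nat)
    (hrow : ∀ r ∈ mat, mat.length ≤ r.length) (hi : i < mat.length) (hj : j < mat.length) :
    pvE (mat.map (fun r => PySem.List.slice r none (some (mat.length : Int)))) i j
      = pvE mat i j := by
  unfold pvE
  have hjr : j < mat[i].length := lt_of_lt_of_le hj (hrow _ (List.getElem_mem hi))
  rw [List.getD_eq_getElem _ [] (by simpa using hi), List.getElem_map,
      List.getD_eq_getElem mat [] hi, PySem.List.slice_to_natCast,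
      List.getD_eq_getElem _ 0 (by simp [List.length_take]; omega),
      List.getD_eq_getElem _ 0 hjr, List.getElem_take]

theorem pvCropT_entry (target : List (List Int)) (n i j : Nat) (hl : n ≤ target.length)
    (hr : ∀ r ∈ target.take n, n ≤ r.length) (hi : i < n) (hj : j < n) :
    pvE ((PySem.List.slice target none (some (n : Int))).map
      (fun r => PySem.List.slice r none (some (n : Int)))) i j = pvE target i j := by
  unfold pvE
  rw [PySem.List.slice_to_natCast]
  have hi' : i < target.length := by omega
  have hit : i < (target.take n).length := by simp [List.length_take]; omega
  have hjr : j < target[i].length := by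
    have := hr (target.take n)[i] (List.getElem_mem hit)
    rw [List.getElem_take] at this
    omega
  rw [List.getD_eq_getElem _ [] (by simpa using hit), List.getElem_map, List.getElem_take,
      List.getD_eq_getElem target [] hi', PySem.List.slice_to_natCast,
      List.getD_eq_getElem _ 0 (by simp [List.length_take]; omega),
      List.getD_eq_getElem _ 0 hjr, List.getElem_take]

-- the rotate-then-compare disjunction over the cropped grids ↔ A's four entrywise conditions
theorem pv_bridge (n : Nat) (M T mat target : List (List Int))
    (hM : pvSq n M) (hT : pvSq n T)
    (eM : ∀ i < n, ∀ j < n, pvE M i j = pvE mat i j)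
    (eT : ∀ i < n, ∀ j < n, pvE T i j = pvE target i j) :
    (M = T ∨ pvRot M = T ∨ pvRot (pvRot M) = T ∨ pvRot (pvRot (pvRot M)) = T)
      ↔ ((∀ i < n, ∀ j < n, pvE mat i j = pvE target i j) ∨
         (∀ i < n, ∀ j < n, pvE mat i j = pvE target (n - 1 - j) i) ∨
         (∀ i < n, ∀ j < n, pvE mat i j = pvE target (n - 1 - i) (n - 1 - j)) ∨
         (∀ i < n, ∀ j < n, pvE mat i j = pvE target j (n - 1 - i))) := by
  have hR1 : pvSq n (pvRot M) := pvRot_sq M n hM.1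
  have hR2 : pvSq n (pvRot (pvRot M)) := pvRot_sq _ n hR1.1
  have hR3 : pvSq n (pvRot (pvRot (pvRot M))) := pvRot_sq _ n hR2.1
  have e1 : ∀ i < n, ∀ j < n, pvE (pvRot M) i j = pvE M (n - 1 - j) i :=
    fun i hi j hj => pvRot_entry M n i j hM.1 hi hj
  have e2 : ∀ i < n, ∀ j < n, pvE (pvRot (pvRot M)) i j = pvE M (n - 1 - i) (n - 1 - j) := by
    intro i hi j hj
    rw [pvRot_entry _ n i j hR1.1 hi hj, e1 (n - 1 - j) (by omega) i hi]
  have e3 : ∀ i < n, ∀ j < n, pvE (pvRot (pvRot (pvRot M))) i j = pvE M j (n - 1 - i) := by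
    intro i hi j hj
    rw [pvRot_entry _ n i j hR2.1 hi hj, e2 (n - 1 - j) (by omega) i hi]
    congr 1; omega
  rw [pv_eq_iff n _ _ hM hT, pv_eq_iff n _ _ hR1 hT,
      pv_eq_iff n _ _ hR2 hT, pv_eq_iff n _ _ hR3 hT]
  constructor
  · rintro (H | H | H | H)
    · refine Or.inl fun i hi j hj => ?_
      have := H i hi j hj
      rwa [eM i hi j hj, eT i hi j hj] at this
    · -- rot M = T gives A's check[3]
      refine Or.inr (Or.inr (Or.inr fun i hi j hj => ?_))
      have := H j hj (n - 1 - i) (by omega)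
      rw [e1 j hj (n - 1 - i) (by omega), show n - 1 - (n - 1 - i) = i by omega,
          eM i hi j hj, eT j hj (n - 1 - i) (by omega)] at this
      exact this
    · refine Or.inr (Or.inr (Or.inl fun i hi j hj => ?_))
      have := H (n - 1 - i) (by omega) (n - 1 - j) (by omega)
      rw [e2 (n - 1 - i) (by omega) (n - 1 - j) (by omega),
          show n - 1 - (n - 1 - i) = i by omega, show n - 1 - (n - 1 - j) = j by omega,
          eM i hi j hj, eT (n - 1 - i) (by omega) (n - 1 - j) (by omega)] at this
      exact this
    · refine Or.inr (Or.inl fun i hi j hj => ?_)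
      have := H (n - 1 - j) (by omega) i hi
      rw [e3 (n - 1 - j) (by omega) i hi, show n - 1 - (n - 1 - j) = j by omega,
          eM i hi j hj, eT (n - 1 - j) (by omega) i hi] at this
      exact this
  · rintro (H | H | H | H)
    · refine Or.inl fun i hi j hj => ?_
      rw [eM i hi j hj, eT i hi j hj]
      exact H i hi j hj
    · -- A's check[1] gives rot³ M = T
      refine Or.inr (Or.inr (Or.inr fun i hi j hj => ?_))
      rw [e3 i hi j hj, eM j hj (n - 1 - i) (by omega), eT i hi j hj]
      have := H j hj (n - 1 - i) (by omega)
      rw [show n - 1 - (n - 1 - i) = i by omega] at this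
      exact this
    · refine Or.inr (Or.inr (Or.inl fun i hi j hj => ?_))
      rw [e2 i hi j hj, eM (n - 1 - i) (by omega) (n - 1 - j) (by omega), eT i hi j hj]
      have := H (n - 1 - i) (by omega) (n - 1 - j) (by omega)
      rw [show n - 1 - (n - 1 - i) = i by omega, show n - 1 - (n - 1 - j) = j by omega] at this
      exact this
    · refine Or.inr (Or.inl fun i hi j hj => ?_)
      rw [e1 i hi j hj, eM (n - 1 - j) (by omega) i hi, eT i hi j hj]
      have := H (n - 1 - j) (by omega) i hi
      rw [show n - 1 - (n - 1 - j) = j by omega] at this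
      exact this

-- ===== VERDICT (by name: the statement is the Claim_ definition above) =====
theorem checkRotateOpti_spec : Claim_equal_checkRotateOpti := by
  intro mat target _ hpre
  obtain ⟨hmr, htl, htr⟩ := hpre
  unfold Spec_checkRotateOpti checkRotateOpti_alt
  rw [Bool.eq_iff_iff, pvLoop_char, pvA_char]
  simp only [Bool.or_eq_true]
  rw [pv_allall mat.length _ (fun i j => pvE mat i j = pvE target i j)
        (fun i j hi hj => by simp [pvIdx2_natCast]),
      pv_allall mat.length _ (fun i j => pvE mat i j = pvE target (mat.length - 1 - j) i)
        (fun i j hi hj => by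
          have h1 : ((mat.length : Int) - (j : Int) - 1) = ((mat.length - 1 - j : Nat) : Int) := by omega
          rw [h1]
          simp [pvIdx2_natCast]),
      pv_allall mat.length _
        (fun i j => pvE mat i j = pvE target (mat.length - 1 - i) (mat.length - 1 - j))
        (fun i j hi hj => by
          have h1 : ((mat.length : Int) - (i : Int) - 1) = ((mat.length - 1 - i : Nat) : Int) := by omega
          have h2 : ((mat.length : Int) - (j : Int) - 1) = ((mat.length - 1 - j : Nat) : Int) := by omega
          rw [h1, h2]
          simp [pvIdx2_natCast]),
      pv_allall mat.length _ (fun i j => pvE mat i j = pvE target j (mat.length - 1 - i))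
        (fun i j hi hj => by
          have h1 : ((mat.length : Int) - (i : Int) - 1) = ((mat.length - 1 - i : Nat) : Int) := by omega
          rw [h1]
          simp [pvIdx2_natCast])]
  exact (pv_bridge mat.length _ _ mat target
    (pvCropM_sq mat hmr) (pvCropT_sq target mat.length htl htr)
    (fun i hi j hj => pvCropM_entry mat i j hmr hi hj)
    (fun i hi j hj => pvCropT_entry target mat.length i j htl htr hi hj)).symm
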